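-- pv_equiv track=rewrite | github.com/genomez/Printer | CombinedPostProc.py | remove_filament_swap_spiral
-- ===== SOURCE A (Python) =====
-- def remove_filament_swap_spiral(gcode_file, lines):
--     # Define the three key lines that make up the erroneous filament swap spiral movement
--     first   = "G2 Z0.4 I0.86 J0.86 P1 F10000 ; spiral lift a little from second lift\n"
--     second  = "G1 X0 Y245 F30000\n"
--     third   = "G1 Z0 F600\n"
--
--     removed = False
--     reason = ""
--
--     # Track positions of key lines
--     first_pos = -1
--     second_pos = -1
--     third_pos = -1
--
--     # Scan for the block, allowing other lines in between
--     n = len(lines)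
--     for i in range(n):
--         # If we hit the filament start marker first, give up
--         if lines[i].strip() == "; filament start gcode":
--             reason = "hit '; filament start gcode' before finding complete sequence"
--             break
--
--         # Look for our key lines in order
--         if first_pos == -1 and lines[i] == first:
--             first_pos = i
--         elif first_pos != -1 and second_pos == -1 and lines[i] == second:
--             second_pos = i
--         elif first_pos != -1 and second_pos != -1 and third_pos == -1 and lines[i] == third:
--             third_pos = i
--             # Found all three in the correct order - comment out these three lines
--             # Comment from last to first to avoid index shifting
--             lines[third_pos] = f"; REMOVED FILAMENT SWAP SPIRAL (PART 3/3): {lines[third_pos].rstrip()}\n"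
--             lines[second_pos] = f"; REMOVED FILAMENT SWAP SPIRAL (PART 2/3): {lines[second_pos].rstrip()}\n"
--             lines[first_pos] = f"; REMOVED FILAMENT SWAP SPIRAL (PART 1/3): {lines[first_pos].rstrip()}\n"
--             removed = True
--             break
--
--     if not removed and not reason:
--         reason = "filament swap spiral sequence not found in expected format"
--
--     # Prepare status message
--     if removed:
--         status_message = f"; Filament swap spiral removal: Successfully commented out erroneous spiral lift-move-lower commands at original lines {first_pos+1}, {second_pos+1}, and {third_pos+1}"
--     else:
--         status_message = f"; Filament swap spiral removal: {reason}. Searched for 'G2 Z0.4...' → 'G1 X0 Y245...' → 'G1 Z0 F600...'"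
--
--     return lines, status_message
-- ===== SOURCE B (Python) =====
-- # Same return value as A; like A it comments the lines list in place when the block is found.
-- def remove_filament_swap_spiral(gcode_file, lines):
--     first   = "G2 Z0.4 I0.86 J0.86 P1 F10000 ; spiral lift a little from second lift\n"
--     second  = "G1 X0 Y245 F30000\n"
--     third   = "G1 Z0 F600\n"
--     n = len(lines)
--     # cutoff: index of the filament-start marker in the stripped lines (or end of file)
--     try:
--         m = [ln.strip() for ln in lines].index("; filament start gcode")
--     except ValueError:
--         m = n
--     # three independent bounded index searches instead of a one-pass state machine
--     try:
--         p1 = lines.index(first, 0, m)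
--         p2 = lines.index(second, p1 + 1, m)
--         p3 = lines.index(third, p2 + 1, m)
--     except ValueError:
--         reason = ("hit '; filament start gcode' before finding complete sequence" if m < n
--                   else "filament swap spiral sequence not found in expected format")
--         return lines, (f"; Filament swap spiral removal: {reason}. "
--                        f"Searched for 'G2 Z0.4...' → 'G1 X0 Y245...' → 'G1 Z0 F600...'")
--     for part, p in ((3, p3), (2, p2), (1, p1)):
--         lines[p] = f"; REMOVED FILAMENT SWAP SPIRAL (PART {part}/3): {lines[p].rstrip()}\n"
--     return lines, (f"; Filament swap spiral removal: Successfully commented out erroneous "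
--                    f"spiral lift-move-lower commands at original lines {p1+1}, {p2+1}, and {p3+1}")
-- ===== Notes on version B (the rewrite author's own statement) =====
-- stated objective: idiomatic
-- what changed: A interleaves marker detection and a three-variable elif state machine in one break-laden scan; B computes the marker cutoff by indexing the stripped lines, then locates the three lines with three independent bounded list.index searches under a single try/except, and builds the result afterwards.
import Mathlib
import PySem

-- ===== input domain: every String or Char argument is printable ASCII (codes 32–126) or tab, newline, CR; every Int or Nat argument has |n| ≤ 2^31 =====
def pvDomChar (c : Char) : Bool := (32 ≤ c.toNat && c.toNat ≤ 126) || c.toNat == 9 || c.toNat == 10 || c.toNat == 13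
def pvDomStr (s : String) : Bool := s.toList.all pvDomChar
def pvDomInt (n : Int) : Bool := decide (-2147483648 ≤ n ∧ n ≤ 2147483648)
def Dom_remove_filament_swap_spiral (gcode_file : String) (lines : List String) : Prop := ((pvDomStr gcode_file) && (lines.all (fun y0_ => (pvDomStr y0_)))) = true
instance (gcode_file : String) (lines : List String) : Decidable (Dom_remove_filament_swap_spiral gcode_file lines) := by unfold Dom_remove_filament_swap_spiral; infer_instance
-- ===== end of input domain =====

-- B replaces A's one-pass elif state machine by a marker lookup on the stripped lines followed by
-- three independent bounded list.index searches (objective: alternative decomposition, same cost).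
-- Both A and B mutate `lines` in place on success identically; the ports model the return value.

-- shared string literals of both Pythons
def pvFirst : String := "G2 Z0.4 I0.86 J0.86 P1 F10000 ; spiral lift a little from second lift\n"
def pvSecond : String := "G1 X0 Y245 F30000\n"
def pvThird : String := "G1 Z0 F600\n"
def pvMarker : String := "; filament start gcode"
def pvMarkerReason : String := "hit '; filament start gcode' before finding complete sequence"
def pvNotFoundReason : String := "filament swap spiral sequence not found in expected format"

-- ===== PORT A =====
-- A's for-loop over range(n) with break, as structural recursion over the yet-unscanned
-- suffix `rest` carrying the running index i and A's state variables; the three in-place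
-- assignments happen inside the loop exactly as in A.
def pvLoopA (lines : List String) (rest : List String) (i : Nat) (fp sp tp : Int) :
    List String × Int × Int × Int × Bool × String :=
  match rest with
  | [] => (lines, fp, sp, tp, false, "")
  | li :: r =>
    if PySem.Str.strip li = pvMarker then
      (lines, fp, sp, tp, false, pvMarkerReason)
    else if fp = -1 ∧ li = pvFirst then
      pvLoopA lines r (i+1) (Int.ofNat i) sp tp
    else if fp ≠ -1 ∧ sp = -1 ∧ li = pvSecond then
      pvLoopA lines r (i+1) fp (Int.ofNat i) tp
    else if fp ≠ -1 ∧ sp ≠ -1 ∧ tp = -1 ∧ li = pvThird then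
      let tp' : Int := Int.ofNat i
      let l1 := PySem.List.pySetD lines tp'
        ("; REMOVED FILAMENT SWAP SPIRAL (PART 3/3): " ++ PySem.Str.rstrip (PySem.List.pyGetD lines tp' "") ++ "\n")
      let l2 := PySem.List.pySetD l1 sp
        ("; REMOVED FILAMENT SWAP SPIRAL (PART 2/3): " ++ PySem.Str.rstrip (PySem.List.pyGetD l1 sp "") ++ "\n")
      let l3 := PySem.List.pySetD l2 fp
        ("; REMOVED FILAMENT SWAP SPIRAL (PART 1/3): " ++ PySem.Str.rstrip (PySem.List.pyGetD l2 fp "") ++ "\n")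
      (l3, fp, sp, tp', true, "")
    else
      pvLoopA lines r (i+1) fp sp tp

def remove_filament_swap_spiral (gcode_file : String) (lines : List String) : List String × String :=
  let res := pvLoopA lines lines 0 (-1) (-1) (-1)
  let lines' := res.1
  let fp := res.2.1
  let sp := res.2.2.1
  let tp := res.2.2.2.1
  let removed := res.2.2.2.2.1
  let reason0 := res.2.2.2.2.2
  let reason := if removed = false ∧ reason0 = "" then pvNotFoundReason else reason0
  if removed then
    (lines', "; Filament swap spiral removal: Successfully commented out erroneous spiral lift-move-lower commands at original lines "
      ++ PySem.Int.toStr (fp + 1) ++ ", " ++ PySem.Int.toStr (sp + 1) ++ ", and " ++ PySem.Int.toStr (tp + 1))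
  else
    (lines', "; Filament swap spiral removal: " ++ reason ++ ". Searched for 'G2 Z0.4...' → 'G1 X0 Y245...' → 'G1 Z0 F600...'")

-- ===== PORT B =====
-- lines.index(t, start, stop): scan the suffix lines[start:] (passed as `rest`, absolute index i),
-- returning the first absolute index < stop whose line equals t (none = ValueError); exact for this
-- bounded-index use because stop ≤ len(lines).
def pvIdxSearch (rest : List String) (i : Nat) (stop : Nat) (t : String) : Option Nat :=
  match rest with
  | [] => none
  | li :: r => if stop ≤ i then none else if li = t then some i else pvIdxSearch r (i+1) stop t

-- m = [ln.strip() for ln in lines].index("; filament start gcode"), except ValueError: m = n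
def pvM (lines : List String) : Nat :=
  (PySem.List.index? (lines.map PySem.Str.strip) pvMarker).getD lines.length

-- the for-loop over ((3,p3),(2,p2),(1,p1)) commenting the lines in place
def pvMutate3 (lines : List String) (p1 p2 p3 : Nat) : List String :=
  [("3", p3), ("2", p2), ("1", p1)].foldl
    (fun acc pp =>
      PySem.List.pySetD acc (Int.ofNat pp.2)
        ("; REMOVED FILAMENT SWAP SPIRAL (PART " ++ pp.1 ++ "/3): "
          ++ PySem.Str.rstrip (PySem.List.pyGetD acc (Int.ofNat pp.2) "") ++ "\n"))
    lines

def remove_filament_swap_spiral_alt (gcode_file : String) (lines : List String) : List String × String :=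
  let n := lines.length
  let m := pvM lines
  match pvIdxSearch (lines.drop 0) 0 m pvFirst with
  | some p1 =>
    match pvIdxSearch (lines.drop (p1+1)) (p1+1) m pvSecond with
    | some p2 =>
      match pvIdxSearch (lines.drop (p2+1)) (p2+1) m pvThird with
      | some p3 =>
        (pvMutate3 lines p1 p2 p3,
         "; Filament swap spiral removal: Successfully commented out erroneous spiral lift-move-lower commands at original lines "
           ++ PySem.Int.toStr (Int.ofNat p1 + 1) ++ ", " ++ PySem.Int.toStr (Int.ofNat p2 + 1) ++ ", and " ++ PySem.Int.toStr (Int.ofNat p3 + 1))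
      | none =>
        (lines, "; Filament swap spiral removal: " ++ (if m < n then pvMarkerReason else pvNotFoundReason)
          ++ ". Searched for 'G2 Z0.4...' → 'G1 X0 Y245...' → 'G1 Z0 F600...'")
    | none =>
      (lines, "; Filament swap spiral removal: " ++ (if m < n then pvMarkerReason else pvNotFoundReason)
        ++ ". Searched for 'G2 Z0.4...' → 'G1 X0 Y245...' → 'G1 Z0 F600...'")
  | none =>
    (lines, "; Filament swap spiral removal: " ++ (if m < n then pvMarkerReason else pvNotFoundReason)
      ++ ". Searched for 'G2 Z0.4...' → 'G1 X0 Y245...' → 'G1 Z0 F600...'")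

-- ===== PRECONDITION & SPEC =====
def Spec_remove_filament_swap_spiral (gcode_file : String) (lines : List String) (out : List String × String) : Prop := out = remove_filament_swap_spiral_alt gcode_file lines
instance (gcode_file : String) (lines : List String) (out : List String × String) : Decidable (Spec_remove_filament_swap_spiral gcode_file lines out) := by unfold Spec_remove_filament_swap_spiral; infer_instance

-- ===== CLAIM (what is proved, stated in full; the proofs are below) =====
def Claim_equal_remove_filament_swap_spiral : Prop := ∀ (gcode_file : String) (lines : List String), Dom_remove_filament_swap_spiral gcode_file lines → Spec_remove_filament_swap_spiral gcode_file lines (remove_filament_swap_spiral gcode_file lines)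

-- ===== LEMMAS AND PROOFS =====

-- first index (from absolute i) whose strip is the marker; i + length if none (proof helper)
def pvFindMarker (rest : List String) (i : Nat) : Nat :=
  match rest with
  | [] => i
  | li :: r => if PySem.Str.strip li = pvMarker then i else pvFindMarker r (i+1)

-- A's post-loop code, as a function of the loop result (proof helper)
def pvFinalA (res : List String × Int × Int × Int × Bool × String) : List String × String :=
  let reason := if res.2.2.2.2.1 = false ∧ res.2.2.2.2.2 = "" then pvNotFoundReason else res.2.2.2.2.2
  if res.2.2.2.2.1 then
    (res.1, "; Filament swap spiral removal: Successfully commented out erroneous spiral lift-move-lower commands at original lines "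
      ++ PySem.Int.toStr (res.2.1 + 1) ++ ", " ++ PySem.Int.toStr (res.2.2.1 + 1) ++ ", and " ++ PySem.Int.toStr (res.2.2.2.1 + 1))
  else
    (res.1, "; Filament swap spiral removal: " ++ reason ++ ". Searched for 'G2 Z0.4...' → 'G1 X0 Y245...' → 'G1 Z0 F600...'")

def pvFail (lines : List String) (n m : Nat) : List String × String :=
  (lines, "; Filament swap spiral removal: " ++ (if m < n then pvMarkerReason else pvNotFoundReason)
    ++ ". Searched for 'G2 Z0.4...' → 'G1 X0 Y245...' → 'G1 Z0 F600...'")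

def pvSucc (lines : List String) (a b c : Nat) : List String × String :=
  (pvMutate3 lines a b c,
   "; Filament swap spiral removal: Successfully commented out erroneous spiral lift-move-lower commands at original lines "
     ++ PySem.Int.toStr (Int.ofNat a + 1) ++ ", " ++ PySem.Int.toStr (Int.ofNat b + 1) ++ ", and " ++ PySem.Int.toStr (Int.ofNat c + 1))

-- B's remaining search chain, one helper per stage (proof helpers)
def pvStage2 (lines : List String) (n m : Nat) (a b : Nat) (i : Nat) : List String × String :=
  match pvIdxSearch (lines.drop i) i m pvThird with
  | none => pvFail lines n m
  | some p3 => pvSucc lines a b p3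

def pvStage1 (lines : List String) (n m : Nat) (a : Nat) (i : Nat) : List String × String :=
  match pvIdxSearch (lines.drop i) i m pvSecond with
  | none => pvFail lines n m
  | some p2 => pvStage2 lines n m a p2 (p2+1)

def pvStage0 (lines : List String) (n m : Nat) (i : Nat) : List String × String :=
  match pvIdxSearch (lines.drop i) i m pvFirst with
  | none => pvFail lines n m
  | some p1 => pvStage1 lines n m p1 (p1+1)

def pvChain (lines : List String) (n m : Nat) (i : Nat) (found : List Nat) : List String × String :=
  match found with
  | [] => pvStage0 lines n m i
  | [a] => pvStage1 lines n m a i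
  | a :: b :: _ => pvStage2 lines n m a b i

theorem pvA_eq_finalA (gcode_file : String) (lines : List String) :
    remove_filament_swap_spiral gcode_file lines = pvFinalA (pvLoopA lines lines 0 (-1) (-1) (-1)) := rfl

theorem pvB_eq_chain (gcode_file : String) (lines : List String) :
    remove_filament_swap_spiral_alt gcode_file lines = pvChain lines lines.length (pvM lines) 0 [] := by
  show _ = pvStage0 lines lines.length (pvM lines) 0
  unfold remove_filament_swap_spiral_alt pvStage0
  cases h1 : pvIdxSearch (List.drop 0 lines) 0 (pvM lines) pvFirst with
  | none => simp only [h1]; rfl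
  | some p1 =>
    simp only [h1]
    unfold pvStage1
    cases h2 : pvIdxSearch (List.drop (p1+1) lines) (p1+1) (pvM lines) pvSecond with
    | none => rfl
    | some p2 =>
      simp only []
      unfold pvStage2
      cases h3 : pvIdxSearch (List.drop (p2+1) lines) (p2+1) (pvM lines) pvThird with
      | none => rfl
      | some p3 => rfl

theorem pvM_eq_findMarker (lines : List String) : pvM lines = pvFindMarker lines 0 := by
  suffices h : ∀ (l : List String) (i : Nat),
      i + (PySem.List.index? (l.map PySem.Str.strip) pvMarker).getD l.length = pvFindMarker l i by
    have := h lines 0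
    unfold pvM
    omega
  intro l
  induction l with
  | nil => intro i; simp [pvFindMarker]
  | cons li r ih =>
    intro i
    simp only [List.map_cons, pvFindMarker]
    by_cases hm : PySem.Str.strip li = pvMarker
    · rw [hm, PySem.List.index?_cons_self, if_pos rfl]
      simp
    · rw [PySem.List.index?_cons_of_ne _ hm, if_neg hm]
      have := ih (i+1)
      cases hix : PySem.List.index? (r.map PySem.Str.strip) pvMarker with
      | none =>
        rw [hix] at this
        simp only [hix, Option.map_none, Option.getD_none, List.length_cons] at *
        omega
      | some k =>
        rw [hix] at this
        simp only [hix, Option.map_some, Option.getD_some] at *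
        omega

theorem pvFindMarker_ge (rest : List String) (i : Nat) : i ≤ pvFindMarker rest i := by
  induction rest generalizing i with
  | nil => simp [pvFindMarker]
  | cons li r ih =>
    simp only [pvFindMarker]
    split
    · exact le_refl i
    · exact le_trans (by omega) (ih (i+1))

theorem pvFinalA_success (l : List String) (fp sp tp : Int) :
    pvFinalA (l, fp, sp, tp, true, "") =
      (l, "; Filament swap spiral removal: Successfully commented out erroneous spiral lift-move-lower commands at original lines "
        ++ PySem.Int.toStr (fp + 1) ++ ", " ++ PySem.Int.toStr (sp + 1) ++ ", and " ++ PySem.Int.toStr (tp + 1)) := by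
  simp [pvFinalA]

theorem pvFinalA_fail (l : List String) (fp sp tp : Int) (reason : String) (h : ¬ reason = "") :
    pvFinalA (l, fp, sp, tp, false, reason) =
      (l, "; Filament swap spiral removal: " ++ reason
        ++ ". Searched for 'G2 Z0.4...' → 'G1 X0 Y245...' → 'G1 Z0 F600...'") := by
  simp [pvFinalA, h]

theorem pvFinalA_nofind (l : List String) (fp sp tp : Int) :
    pvFinalA (l, fp, sp, tp, false, "") =
      (l, "; Filament swap spiral removal: " ++ pvNotFoundReason
        ++ ". Searched for 'G2 Z0.4...' → 'G1 X0 Y245...' → 'G1 Z0 F600...'") := by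
  simp [pvFinalA]

theorem pvDropSucc (lines : List String) (i : Nat) (li : String) (r : List String)
    (hd : lines.drop i = li :: r) : lines.drop (i+1) = r := by
  have h := congrArg List.tail hd
  simpa [List.tail_drop] using h

theorem pvChain_nil (lines : List String) (n m : Nat) (i : Nat) (found : List Nat)
    (hd : lines.drop i = []) :
    pvChain lines n m i found = pvFail lines n m := by
  match found with
  | [] => show pvStage0 _ _ _ _ = _; unfold pvStage0; rw [hd]; rfl
  | [a] => show pvStage1 _ _ _ _ _ = _; unfold pvStage1; rw [hd]; rfl
  | a :: b :: t => show pvStage2 _ _ _ _ _ _ = _; unfold pvStage2; rw [hd]; rfl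

theorem pvChain_stop (lines : List String) (n m : Nat) (li : String) (r : List String)
    (i : Nat) (found : List Nat) (hd : lines.drop i = li :: r) (hs : m ≤ i) :
    pvChain lines n m i found = pvFail lines n m := by
  have hsearch : ∀ t, pvIdxSearch (lines.drop i) i m t = none := by
    intro t; rw [hd]; simp only [pvIdxSearch]; rw [if_pos hs]
  match found with
  | [] => show pvStage0 _ _ _ _ = _; unfold pvStage0; rw [hsearch]
  | [a] => show pvStage1 _ _ _ _ _ = _; unfold pvStage1; rw [hsearch]
  | a :: b :: t => show pvStage2 _ _ _ _ _ _ = _; unfold pvStage2; rw [hsearch]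

-- step lemma, stage 2: advance one line (no marker stop at i)
theorem pvStage2_cons (lines : List String) (n m : Nat) (li : String) (r : List String)
    (i : Nat) (a b : Nat) (hd : lines.drop i = li :: r) (hs : ¬ m ≤ i) :
    pvStage2 lines n m a b i =
      if li = pvThird then pvSucc lines a b i else pvStage2 lines n m a b (i+1) := by
  have hd' := pvDropSucc lines i li r hd
  unfold pvStage2
  rw [hd, hd']
  simp only [pvIdxSearch]
  rw [if_neg hs]
  by_cases h3 : li = pvThird
  · rw [if_pos h3, if_pos h3]
  · rw [if_neg h3, if_neg h3]

-- step lemma, stage 1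
theorem pvStage1_cons (lines : List String) (n m : Nat) (li : String) (r : List String)
    (i : Nat) (a : Nat) (hd : lines.drop i = li :: r) (hs : ¬ m ≤ i) :
    pvStage1 lines n m a i =
      if li = pvSecond then pvStage2 lines n m a i (i+1) else pvStage1 lines n m a (i+1) := by
  have hd' := pvDropSucc lines i li r hd
  unfold pvStage1
  rw [hd, hd']
  simp only [pvIdxSearch]
  rw [if_neg hs]
  by_cases h2 : li = pvSecond
  · rw [if_pos h2, if_pos h2]
  · rw [if_neg h2, if_neg h2]

-- step lemma, stage 0
theorem pvStage0_cons (lines : List String) (n m : Nat) (li : String) (r : List String)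
    (i : Nat) (hd : lines.drop i = li :: r) (hs : ¬ m ≤ i) :
    pvStage0 lines n m i =
      if li = pvFirst then pvStage1 lines n m i (i+1) else pvStage0 lines n m (i+1) := by
  have hd' := pvDropSucc lines i li r hd
  unfold pvStage0
  rw [hd, hd']
  simp only [pvIdxSearch]
  rw [if_neg hs]
  by_cases h1 : li = pvFirst
  · rw [if_pos h1, if_pos h1]
  · rw [if_neg h1, if_neg h1]

theorem pvKey (rest : List String) (i n m : Nat) (lines : List String) (fp sp : Int) (found : List Nat)
    (hd : lines.drop i = rest)
    (hn : i + rest.length = n)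
    (hm : pvFindMarker rest i = m)
    (hrel : (fp = -1 ∧ sp = -1 ∧ found = [])
          ∨ (∃ a : Nat, fp = (a : Int) ∧ sp = -1 ∧ found = [a])
          ∨ (∃ a b : Nat, fp = (a : Int) ∧ sp = (b : Int) ∧ found = [a, b])) :
    pvFinalA (pvLoopA lines rest i fp sp (-1)) = pvChain lines n m i found := by
  induction rest generalizing i fp sp found with
  | nil =>
    have hi : m = n := by simp [pvFindMarker] at hm; simp at hn; omega
    rw [pvChain_nil lines n m i found hd]
    show pvFinalA (lines, fp, sp, -1, false, "") = _
    rw [pvFinalA_nofind]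
    unfold pvFail
    rw [if_neg (by omega : ¬ m < n)]
  | cons li r ih =>
    have hd' := pvDropSucc lines i li r hd
    have hn' : (i+1) + r.length = n := by simp at hn; omega
    simp only [pvLoopA]
    by_cases hmk : PySem.Str.strip li = pvMarker
    · -- both stop at the marker line
      have hmi : m = i := by simp only [pvFindMarker, if_pos hmk] at hm; omega
      rw [if_pos hmk, pvChain_stop lines n m li r i found hd (by omega)]
      rw [pvFinalA_fail lines fp sp (-1) pvMarkerReason (by decide)]
      unfold pvFail
      rw [if_pos (by simp at hn; omega : m < n)]
    · have hm' : pvFindMarker r (i+1) = m := by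
        simp only [pvFindMarker, if_neg hmk] at hm; exact hm
      have hs : ¬ m ≤ i := by have := pvFindMarker_ge r (i+1); omega
      rw [if_neg hmk]
      rcases hrel with ⟨hf, hsp, hp⟩ | ⟨a, hf, hsp, hp⟩ | ⟨a, b, hf, hsp, hp⟩
      · subst hf; subst hsp; subst hp
        show _ = pvStage0 lines n m i
        rw [pvStage0_cons lines n m li r i hd hs]
        by_cases h1 : li = pvFirst
        · rw [if_pos (⟨rfl, h1⟩ : (-1 : Int) = -1 ∧ li = pvFirst), if_pos h1]
          exact ih (i+1) (Int.ofNat i) (-1) [i] hd' hn' hm' (Or.inr (Or.inl ⟨i, rfl, rfl, rfl⟩))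
        · rw [if_neg (fun h => h1 h.2), if_neg (fun h : (-1 : Int) ≠ -1 ∧ _ => h.1 rfl),
            if_neg (fun h : (-1 : Int) ≠ -1 ∧ _ => h.1 rfl), if_neg h1]
          exact ih (i+1) (-1) (-1) [] hd' hn' hm' (Or.inl ⟨rfl, rfl, rfl⟩)
      · subst hf; subst hsp; subst hp
        have hfp : ¬ ((a : Int) = -1) := by omega
        show _ = pvStage1 lines n m a i
        rw [pvStage1_cons lines n m li r i a hd hs]
        rw [if_neg (fun h => hfp h.1)]
        by_cases h2 : li = pvSecond
        · rw [if_pos (⟨hfp, rfl, h2⟩ : (a : Int) ≠ -1 ∧ (-1 : Int) = -1 ∧ li = pvSecond), if_pos h2]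
          exact ih (i+1) (a : Int) (Int.ofNat i) [a, i] hd' hn' hm'
            (Or.inr (Or.inr ⟨a, i, rfl, rfl, rfl⟩))
        · rw [if_neg (fun h : _ ∧ _ ∧ li = pvSecond => h2 h.2.2),
            if_neg (fun h : _ ∧ (-1 : Int) ≠ -1 ∧ _ => h.2.1 rfl), if_neg h2]
          exact ih (i+1) (a : Int) (-1) [a] hd' hn' hm' (Or.inr (Or.inl ⟨a, rfl, rfl, rfl⟩))
      · subst hf; subst hsp; subst hp
        have hfp : ¬ ((a : Int) = -1) := by omega
        have hsp' : ¬ ((b : Int) = -1) := by omega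
        show _ = pvStage2 lines n m a b i
        rw [pvStage2_cons lines n m li r i a b hd hs]
        rw [if_neg (fun h => hfp h.1), if_neg (fun h : _ ∧ (b : Int) = -1 ∧ _ => hsp' h.2.1)]
        by_cases h3 : li = pvThird
        · rw [if_pos (⟨hfp, hsp', trivial, h3⟩ : (a : Int) ≠ -1 ∧ (b : Int) ≠ -1 ∧ True ∧ li = pvThird),
            if_pos h3]
          show pvFinalA _ = pvSucc lines a b i
          rw [pvFinalA_success]
          unfold pvSucc pvMutate3
          simp only [List.foldl]
          rfl
        · rw [if_neg (fun h : _ ∧ _ ∧ _ ∧ li = pvThird => h3 h.2.2.2), if_neg h3]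
          exact ih (i+1) (a : Int) (b : Int) [a, b] hd' hn' hm'
            (Or.inr (Or.inr ⟨a, b, rfl, rfl, rfl⟩))

-- ===== VERDICT (by name: the statement is the Claim_ definition above) =====
theorem remove_filament_swap_spiral_spec : Claim_equal_remove_filament_swap_spiral := by
  intro gcode_file lines _
  unfold Spec_remove_filament_swap_spiral
  rw [pvA_eq_finalA gcode_file, pvB_eq_chain gcode_file]
  exact pvKey lines 0 lines.length (pvM lines) lines (-1) (-1) [] rfl (by omega)
    (by rw [pvM_eq_findMarker]) (Or.inl ⟨rfl, rfl, rfl⟩)
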